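-- pv_equiv track=rewrite | github.com/FiaLDI/lab6-alg | prog/2-pointsCoversU.py | pointsCoverU
-- ===== SOURCE A (Python) =====
-- def pointsCoverU(S):
--     rez = []
--     i = 0
--     r = S[i] + 1
--     while i < len(S):
--         rez.append([S[i], S[i] + 1])
--         i += 1
--         try:
--             while S[i] <= r:
--                 i += 1
--             r = S[i] + 1
--         except: pass
--     return rez
-- ===== SOURCE B (Python) =====
-- def pointsCoverU(S):
--     # Divide and conquer: cover S[lo:hi] given the current covered bound 'last';
--     # returns (intervals, new bound). A point starts a new unit interval iff it
--     # exceeds the bound inherited from everything to its left.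
--     def go(lo, hi, last):
--         if hi - lo == 1:
--             p = S[lo]
--             if p > last:
--                 return [[p, p + 1]], p + 1
--             return [], last
--         mid = (lo + hi) // 2
--         r1, l1 = go(lo, mid, last)
--         r2, l2 = go(mid, hi, l1)
--         return r1 + r2, l2
--     rez, _ = go(0, len(S), S[0] - 1)
--     return rez
-- ===== Notes on version B (the rewrite author's own statement) =====
-- stated objective: alternative
-- what changed: Replaced A's index-walking outer/inner while loops with try/except termination by a balanced divide-and-conquer: recursively cover the two halves of the list, threading the covered bound from the left half into the right, and concatenate the interval lists.
import Mathlib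
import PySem

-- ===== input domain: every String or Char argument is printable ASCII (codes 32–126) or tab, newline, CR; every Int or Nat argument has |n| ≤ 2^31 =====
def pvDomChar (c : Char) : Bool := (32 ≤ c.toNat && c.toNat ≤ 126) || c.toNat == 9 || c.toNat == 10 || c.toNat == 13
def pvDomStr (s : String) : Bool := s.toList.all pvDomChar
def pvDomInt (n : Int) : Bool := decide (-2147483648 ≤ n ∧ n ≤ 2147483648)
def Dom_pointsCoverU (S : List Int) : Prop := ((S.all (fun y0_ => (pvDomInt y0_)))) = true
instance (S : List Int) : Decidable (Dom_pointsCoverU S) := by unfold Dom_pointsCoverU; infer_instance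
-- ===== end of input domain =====

-- B replaces A's nested index-walking while loops and try/except termination by a balanced
-- divide-and-conquer recursion on halves that threads the covered bound left-to-right (alternative decomposition).


-- ===== PORT A =====
-- inner 'while S[i] <= r: i += 1' (stops at first index with S[i] > r, or at len(S), where Python raises IndexError caught by the bare except)
def skipA (S : List Int) (r : Int) (i : Nat) : Nat :=
  if h : i < S.length then
    if S[i] ≤ r then skipA S r (i + 1) else i
  else i
termination_by S.length - i

theorem skipA_ge (S : List Int) (r : Int) (i : Nat) : i ≤ skipA S r i := by
  unfold skipA
  split
  · split
    · exact le_trans (Nat.le_succ i) (skipA_ge S r (i + 1))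
    · exact le_refl i
  · exact le_refl i
termination_by S.length - i

-- outer 'while i < len(S)': append [S[i], S[i]+1], i += 1, run the inner skip, and update r
-- only if the inner loop stopped inside the list (on IndexError the 'except: pass' keeps r).
def outerA (S : List Int) (i : Nat) (r : Int) (rez : List (List Int)) : List (List Int) :=
  if h : i < S.length then
    let j := skipA S r (i + 1)
    let r' := if h2 : j < S.length then S[j] + 1 else r
    outerA S j r' (rez ++ [[S[i], S[i] + 1]])
  else rez
termination_by S.length - i
decreasing_by
  have := skipA_ge S r (i + 1)
  omega

def pointsCoverU (S : List Int) : List (List Int) :=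
  match S with
  | [] => []  -- Python A raises IndexError at 'r = S[i] + 1' here; excluded by Pre_
  | s0 :: _ => outerA S 0 (s0 + 1) []

-- ===== PORT B =====
-- 'def go(lo, hi, last)' of Source B. go is only ever reached with lo < hi (the initial call has
-- hi = len(S) ≥ 1, and a split with hi - lo ≥ 2 gives lo < mid < hi), so Python's
-- 'if hi - lo == 1' test is written as the equivalent-in-context 'hi ≤ lo + 1' to make
-- termination evident; S[lo] is always in range there (0 ≤ lo < hi ≤ len S), ported as getD.
def goB (S : List Int) (lo hi : Nat) (last : Int) : List (List Int) × Int :=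
  if hi ≤ lo + 1 then
    let p := S.getD lo 0
    if p > last then ([[p, p + 1]], p + 1) else ([], last)
  else
    let mid := (lo + hi) / 2
    let (r1, l1) := goB S lo mid last
    let (r2, l2) := goB S mid hi l1
    (r1 ++ r2, l2)
termination_by hi - lo
decreasing_by
  · omega
  · omega

def pointsCoverU_alt (S : List Int) : List (List Int) :=
  match S with
  | [] => []  -- Python B raises IndexError at 'S[0]' here; excluded by Pre_
  | s0 :: _ => (goB S 0 S.length (s0 - 1)).1

-- ===== PRECONDITION & SPEC =====
-- Pre_ excludes only the empty list, on which both Pythons raise IndexError.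
def Pre_pointsCoverU (S : List Int) : Prop := S ≠ []
instance (S : List Int) : Decidable (Pre_pointsCoverU S) := by unfold Pre_pointsCoverU; infer_instance
def pvWitness_pointsCoverU : List Int := ([0])

def Spec_pointsCoverU (S : List Int) (out : List (List Int)) : Prop := out = pointsCoverU_alt S
instance (S : List Int) (out : List (List Int)) : Decidable (Spec_pointsCoverU S out) := by unfold Spec_pointsCoverU; infer_instance

-- ===== CLAIM (what is proved, stated in full; the proofs are below) =====
def Claim_equal_pointsCoverU : Prop := ∀ (S : List Int), Dom_pointsCoverU S → Pre_pointsCoverU S → Spec_pointsCoverU S (pointsCoverU S)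

-- ===== LEMMAS AND PROOFS =====

-- the suffix of intervals the greedy pass produces given current bound 'last' and remaining points l
def loopB (last : Int) (l : List Int) : List (List Int) :=
  match l with
  | [] => []
  | p :: l => if p > last then [p, p + 1] :: loopB (p + 1) l else loopB last l

-- the bound after the greedy pass over l starting from 'last'
def lastOf (last : Int) (l : List Int) : Int :=
  match l with
  | [] => last
  | p :: l => if p > last then lastOf (p + 1) l else lastOf last l

theorem skipA_le (S : List Int) (r : Int) (i : Nat) (h : i ≤ S.length) :
    skipA S r i ≤ S.length := by
  unfold skipA
  split
  · split
    · exact skipA_le S r (i + 1) (by omega)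
    · exact h
  · exact h
termination_by S.length - i

theorem skipA_gt (S : List Int) (r : Int) (i : Nat) (v : Int)
    (hv : S[skipA S r i]? = some v) : r < v := by
  rw [skipA] at hv
  split at hv
  · next h1 =>
    split at hv
    · exact skipA_gt S r (i + 1) v hv
    · next h2 =>
      rw [List.getElem?_eq_getElem h1] at hv
      cases hv
      omega
  · next h1 =>
    rw [List.getElem?_eq_none (by omega)] at hv
    cases hv
termination_by S.length - i

theorem loopB_skip (S : List Int) (r : Int) (i : Nat) :
    loopB r (S.drop i) = loopB r (S.drop (skipA S r i)) := by
  unfold skipA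
  split
  · next h =>
    split
    · next hle =>
      rw [List.drop_eq_getElem_cons h]
      simp only [loopB, show ¬ S[i] > r by omega, if_false]
      exact loopB_skip S r (i + 1)
    · rfl
  · rfl
termination_by S.length - i

theorem outerA_eq (S : List Int) (i : Nat) (hi : i < S.length) (rez : List (List Int)) :
    outerA S i (S[i] + 1) rez
      = rez ++ [S[i], S[i] + 1] :: loopB (S[i] + 1) (S.drop (i + 1)) := by
  rw [outerA]
  simp only [hi, dite_true]
  have hij : i + 1 ≤ skipA S (S[i] + 1) (i + 1) := skipA_ge S (S[i] + 1) (i + 1)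
  have hjle : skipA S (S[i] + 1) (i + 1) ≤ S.length := skipA_le S (S[i] + 1) (i + 1) (by omega)
  by_cases hjl : skipA S (S[i] + 1) (i + 1) < S.length
  · have hgt : S[i] + 1 < S[skipA S (S[i] + 1) (i + 1)] :=
      skipA_gt S (S[i] + 1) (i + 1) _ (List.getElem?_eq_getElem hjl)
    simp only [hjl, dite_true]
    rw [outerA_eq S (skipA S (S[i] + 1) (i + 1)) hjl]
    rw [loopB_skip S (S[i] + 1) (i + 1), List.drop_eq_getElem_cons hjl]
    simp [loopB, hgt]
  · have hj' : skipA S (S[i] + 1) (i + 1) = S.length := by omega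
    simp only [hjl, dite_false]
    rw [outerA]
    simp only [hjl, dite_false]
    rw [loopB_skip S (S[i] + 1) (i + 1), hj']
    simp [loopB]
termination_by S.length - i
decreasing_by omega

-- the greedy pass splits over an append: the right part runs from the left part's final bound
theorem loopB_append (a b : List Int) (last : Int) :
    loopB last (a ++ b) = loopB last a ++ loopB (lastOf last a) b := by
  induction a generalizing last with
  | nil => simp [loopB, lastOf]
  | cons p a ih =>
    by_cases hp : p > last
    · simp [loopB, lastOf, hp, ih]
    · simp [loopB, lastOf, hp, ih]

theorem lastOf_append (a b : List Int) (last : Int) :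
    lastOf last (a ++ b) = lastOf (lastOf last a) b := by
  induction a generalizing last with
  | nil => simp [lastOf]
  | cons p a ih =>
    by_cases hp : p > last
    · simp [lastOf, hp, ih]
    · simp [lastOf, hp, ih]

-- goB on S[lo:hi] is exactly the greedy pass over that segment together with its final bound
theorem goB_eq (S : List Int) (lo hi : Nat) (last : Int)
    (hlh : lo < hi) (hle : hi ≤ S.length) :
    goB S lo hi last
      = (loopB last ((S.drop lo).take (hi - lo)), lastOf last ((S.drop lo).take (hi - lo))) := by
  rw [goB]
  by_cases hbase : hi ≤ lo + 1
  · have hhi : hi = lo + 1 := by omega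
    have hlo : lo < S.length := by omega
    have hseg : (S.drop lo).take (hi - lo) = [S[lo]] := by
      rw [hhi, List.drop_eq_getElem_cons hlo, show lo + 1 - lo = 1 by omega]
      rfl
    have hget : S.getD lo 0 = S[lo] := by
      simp [List.getD, List.getElem?_eq_getElem hlo]
    simp only [hbase, if_true, hseg, hget, loopB, lastOf]
    by_cases hp : S[lo] > last
    · simp [hp]
    · simp [hp]
  · simp only [hbase, if_false]
    have h1 : lo < (lo + hi) / 2 := by omega
    have h2 : (lo + hi) / 2 < hi := by omega
    rw [goB_eq S lo ((lo + hi) / 2) last h1 (by omega)]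
    rw [goB_eq S ((lo + hi) / 2) hi _ h2 hle]
    have hsplit : (S.drop lo).take (hi - lo)
        = (S.drop lo).take ((lo + hi) / 2 - lo)
          ++ (S.drop ((lo + hi) / 2)).take (hi - (lo + hi) / 2) := by
      have : hi - lo = ((lo + hi) / 2 - lo) + (hi - (lo + hi) / 2) := by omega
      rw [this, List.take_add, List.drop_drop]
      have h3 : lo + ((lo + hi) / 2 - lo) = (lo + hi) / 2 := by omega
      rw [h3]
    rw [hsplit, loopB_append, lastOf_append]
termination_by hi - lo

-- ===== VERDICT (by name: the statement is the Claim_ definition above) =====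
theorem pointsCoverU_spec : Claim_equal_pointsCoverU := by
  intro S _ hpre
  unfold Spec_pointsCoverU
  match S with
  | [] => exact absurd rfl hpre
  | s0 :: rest =>
    show pointsCoverU (s0 :: rest) = pointsCoverU_alt (s0 :: rest)
    simp only [pointsCoverU, pointsCoverU_alt]
    have h0 : 0 < (s0 :: rest).length := by simp
    have hA := outerA_eq (s0 :: rest) 0 h0 []
    simp only [List.getElem_cons_zero, List.drop_succ_cons, List.drop_zero, List.nil_append] at hA
    rw [hA, goB_eq (s0 :: rest) 0 (s0 :: rest).length (s0 - 1) h0 (le_refl _)]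
    simp only [Nat.sub_zero, List.drop_zero, List.take_length]
    simp [loopB, show s0 > s0 - 1 by omega]
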